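-- pv_equiv track=rewrite | github.com/Wej28C/Cryptography-Projects-in-Python | Code603/Code TP4_8/Codeur_Erreur.py | TestErreur
-- ===== SOURCE A (Python) =====
-- def TestErreur(binaire603):
--     # Vérifier si la longueur du binaire603 est correcte
--     if len(binaire603) != 64 + 8 + 8:
--         return "Erreur: Taille incorrecte du binaire603"
--
--     # Créer une matrice carrée à partir des 64 premiers octets
--     matrice_carree = [binaire603[i:i+8] for i in range(0, 64, 8)]
--
--     # Calculer les sommes des lignes et des colonnes
--     sommes_lignes = [sum(row) for row in matrice_carree]
--     sommes_colonnes = [sum(col) for col in zip(*matrice_carree)]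
--
--     # Vérifier si les sommes correspondent aux 8 octets suivants
--     if sommes_lignes == binaire603[64:72] and sommes_colonnes == binaire603[72:]:
--         return "Les sommes des lignes et des colonnes sont correctes"
--     else:
--         # Trouver l'erreur s'il y en a une
--         erreur = None
--         for i, row_sum in enumerate(sommes_lignes):
--             if row_sum != binaire603[64 + i]:
--                 erreur = (i, "ligne")
--                 break
--         if not erreur:
--             for j, col_sum in enumerate(sommes_colonnes):
--                 if col_sum != binaire603[72 + j]:
--                     erreur = (j, "colonne")
--                     break
--
--         return f"Erreur: L'erreur est à la {erreur[1]} {erreur[0]}"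
-- ===== SOURCE B (Python) =====
-- def TestErreur(binaire603):
--     if len(binaire603) != 80:
--         return "Erreur: Taille incorrecte du binaire603"
--     for i in range(8):
--         if sum(binaire603[8 * i:8 * i + 8]) != binaire603[64 + i]:
--             return f"Erreur: L'erreur est à la ligne {i}"
--     for j in range(8):
--         if sum(binaire603[8 * r + j] for r in range(8)) != binaire603[72 + j]:
--             return f"Erreur: L'erreur est à la colonne {j}"
--     return "Les sommes des lignes et des colonnes sont correctes"
-- ===== Notes on version B (the rewrite author's own statement) =====
-- stated objective: simpler
-- what changed: B drops A's matrix construction, zip-transpose, sum lists and double compare-then-rescan, replacing them by two direct early-return loops over row and column sums.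
import Mathlib
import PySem

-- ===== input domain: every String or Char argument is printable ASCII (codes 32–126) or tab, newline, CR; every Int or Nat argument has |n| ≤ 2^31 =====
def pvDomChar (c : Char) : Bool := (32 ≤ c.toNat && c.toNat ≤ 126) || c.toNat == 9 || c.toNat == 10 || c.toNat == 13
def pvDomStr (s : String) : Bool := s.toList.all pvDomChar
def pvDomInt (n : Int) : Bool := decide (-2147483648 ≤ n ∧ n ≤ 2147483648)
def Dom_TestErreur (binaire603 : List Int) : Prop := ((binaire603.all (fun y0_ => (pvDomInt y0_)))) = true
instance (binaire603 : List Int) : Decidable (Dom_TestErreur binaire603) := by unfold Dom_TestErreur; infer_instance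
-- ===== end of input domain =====

-- B drops A's matrix/zip/sum-list construction and double compare-then-rescan for two direct early-return loops; equivalence of the return value is proved below.

-- ===== PORT A =====

-- zip(*rows): truncating transpose, ported as the builtin's behaviour (min length of the rows)
def pyZipStar (rows : List (List Int)) : List (List Int) :=
  if rows = [] then []
  else (List.range ((rows.map List.length).min?.getD 0)).map
    (fun j => rows.map (fun r => r.getD j 0))

-- the 'for i, s in enumerate(sums): if s != b[base+i]: erreur = (i, tag); break' loop
def pvFirstBad (tag : String) (base : Int) (b : List Int) : Nat → List Int → Option (Nat × String)
  | _, [] => none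
  | i, s :: rest =>
    if s ≠ PySem.List.pyGetD b (base + (i : Int)) 0 then some (i, tag)
    else pvFirstBad tag base b (i + 1) rest

def TestErreur (binaire603 : List Int) : String :=
  if binaire603.length ≠ 64 + 8 + 8 then "Erreur: Taille incorrecte du binaire603"
  else
    let matrice := (PySem.List.pyRange 0 64 8).map
      (fun i => PySem.List.slice binaire603 (some i) (some (i + 8)))
    let sommesL := matrice.map List.sum
    let sommesC := (pyZipStar matrice).map List.sum
    if sommesL = PySem.List.slice binaire603 (some 64) (some 72) ∧
       sommesC = PySem.List.slice binaire603 (some 72) none then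
      "Les sommes des lignes et des colonnes sont correctes"
    else
      let erreur :=
        match pvFirstBad "ligne" 64 binaire603 0 sommesL with
        | some e => some e
        | none => pvFirstBad "colonne" 72 binaire603 0 sommesC
      match erreur with
      | some (i, t) => "Erreur: L'erreur est à la " ++ t ++ " " ++ PySem.Int.toStr (i : Int)
      -- unreachable: Python raises TypeError on erreur=None, but the compared slices have
      -- length 8 = length of the sum lists, so a failed comparison always yields a mismatch
      | none => ""

-- ===== PORT B =====

def pvRowErr (b : List Int) : List Int → Option String
  | [] => none
  | i :: rest =>
    if (PySem.List.slice b (some (8 * i)) (some (8 * i + 8))).sum ≠ PySem.List.pyGetD b (64 + i) 0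
    then some ("Erreur: L'erreur est à la ligne " ++ PySem.Int.toStr i)
    else pvRowErr b rest

def pvColErr (b : List Int) : List Int → Option String
  | [] => none
  | j :: rest =>
    if ((PySem.List.pyRange 0 8 1).map (fun r => PySem.List.pyGetD b (8 * r + j) 0)).sum
         ≠ PySem.List.pyGetD b (72 + j) 0
    then some ("Erreur: L'erreur est à la colonne " ++ PySem.Int.toStr j)
    else pvColErr b rest

def TestErreur_alt (binaire603 : List Int) : String :=
  if binaire603.length ≠ 80 then "Erreur: Taille incorrecte du binaire603"
  else
    match pvRowErr binaire603 (PySem.List.pyRange 0 8 1) with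
    | some s => s
    | none =>
      match pvColErr binaire603 (PySem.List.pyRange 0 8 1) with
      | some s => s
      | none => "Les sommes des lignes et des colonnes sont correctes"

-- ===== PRECONDITION & SPEC =====
def Spec_TestErreur (binaire603 : List Int) (out : String) : Prop := out = TestErreur_alt binaire603
instance (binaire603 : List Int) (out : String) : Decidable (Spec_TestErreur binaire603 out) := by unfold Spec_TestErreur; infer_instance

-- ===== CLAIM (what is proved, stated in full; the proofs are below) =====
def Claim_equal_TestErreur : Prop := ∀ (binaire603 : List Int), Dom_TestErreur binaire603 → Spec_TestErreur binaire603 (TestErreur binaire603)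

-- ===== LEMMAS AND PROOFS =====

-- ===== VERDICT (by name: the statement is the Claim_ definition above) =====
theorem TestErreur_spec : Claim_equal_TestErreur := by
  intro b _
  unfold Spec_TestErreur
  by_cases h : b.length = 80
  ·
    obtain ⟨a0, b, rfl⟩ : ∃ x t, b = x :: t := by cases b with | nil => simp at h | cons x t => exact ⟨x, t, rfl⟩
    obtain ⟨a1, b, rfl⟩ : ∃ x t, b = x :: t := by cases b with | nil => simp at h | cons x t => exact ⟨x, t, rfl⟩
    obtain ⟨a2, b, rfl⟩ : ∃ x t, b = x :: t := by cases b with | nil => simp at h | cons x t => exact ⟨x, t, rfl⟩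
    obtain ⟨a3, b, rfl⟩ : ∃ x t, b = x :: t := by cases b with | nil => simp at h | cons x t => exact ⟨x, t, rfl⟩
    obtain ⟨a4, b, rfl⟩ : ∃ x t, b = x :: t := by cases b with | nil => simp at h | cons x t => exact ⟨x, t, rfl⟩
    obtain ⟨a5, b, rfl⟩ : ∃ x t, b = x :: t := by cases b with | nil => simp at h | cons x t => exact ⟨x, t, rfl⟩
    obtain ⟨a6, b, rfl⟩ : ∃ x t, b = x :: t := by cases b with | nil => simp at h | cons x t => exact ⟨x, t, rfl⟩
    obtain ⟨a7, b, rfl⟩ : ∃ x t, b = x :: t := by cases b with | nil => simp at h | cons x t => exact ⟨x, t, rfl⟩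
    obtain ⟨a8, b, rfl⟩ : ∃ x t, b = x :: t := by cases b with | nil => simp at h | cons x t => exact ⟨x, t, rfl⟩
    obtain ⟨a9, b, rfl⟩ : ∃ x t, b = x :: t := by cases b with | nil => simp at h | cons x t => exact ⟨x, t, rfl⟩
    obtain ⟨a10, b, rfl⟩ : ∃ x t, b = x :: t := by cases b with | nil => simp at h | cons x t => exact ⟨x, t, rfl⟩
    obtain ⟨a11, b, rfl⟩ : ∃ x t, b = x :: t := by cases b with | nil => simp at h | cons x t => exact ⟨x, t, rfl⟩
    obtain ⟨a12, b, rfl⟩ : ∃ x t, b = x :: t := by cases b with | nil => simp at h | cons x t => exact ⟨x, t, rfl⟩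
    obtain ⟨a13, b, rfl⟩ : ∃ x t, b = x :: t := by cases b with | nil => simp at h | cons x t => exact ⟨x, t, rfl⟩
    obtain ⟨a14, b, rfl⟩ : ∃ x t, b = x :: t := by cases b with | nil => simp at h | cons x t => exact ⟨x, t, rfl⟩
    obtain ⟨a15, b, rfl⟩ : ∃ x t, b = x :: t := by cases b with | nil => simp at h | cons x t => exact ⟨x, t, rfl⟩
    obtain ⟨a16, b, rfl⟩ : ∃ x t, b = x :: t := by cases b with | nil => simp at h | cons x t => exact ⟨x, t, rfl⟩
    obtain ⟨a17, b, rfl⟩ : ∃ x t, b = x :: t := by cases b with | nil => simp at h | cons x t => exact ⟨x, t, rfl⟩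
    obtain ⟨a18, b, rfl⟩ : ∃ x t, b = x :: t := by cases b with | nil => simp at h | cons x t => exact ⟨x, t, rfl⟩
    obtain ⟨a19, b, rfl⟩ : ∃ x t, b = x :: t := by cases b with | nil => simp at h | cons x t => exact ⟨x, t, rfl⟩
    obtain ⟨a20, b, rfl⟩ : ∃ x t, b = x :: t := by cases b with | nil => simp at h | cons x t => exact ⟨x, t, rfl⟩
    obtain ⟨a21, b, rfl⟩ : ∃ x t, b = x :: t := by cases b with | nil => simp at h | cons x t => exact ⟨x, t, rfl⟩
    obtain ⟨a22, b, rfl⟩ : ∃ x t, b = x :: t := by cases b with | nil => simp at h | cons x t => exact ⟨x, t, rfl⟩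
    obtain ⟨a23, b, rfl⟩ : ∃ x t, b = x :: t := by cases b with | nil => simp at h | cons x t => exact ⟨x, t, rfl⟩
    obtain ⟨a24, b, rfl⟩ : ∃ x t, b = x :: t := by cases b with | nil => simp at h | cons x t => exact ⟨x, t, rfl⟩
    obtain ⟨a25, b, rfl⟩ : ∃ x t, b = x :: t := by cases b with | nil => simp at h | cons x t => exact ⟨x, t, rfl⟩
    obtain ⟨a26, b, rfl⟩ : ∃ x t, b = x :: t := by cases b with | nil => simp at h | cons x t => exact ⟨x, t, rfl⟩
    obtain ⟨a27, b, rfl⟩ : ∃ x t, b = x :: t := by cases b with | nil => simp at h | cons x t => exact ⟨x, t, rfl⟩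
    obtain ⟨a28, b, rfl⟩ : ∃ x t, b = x :: t := by cases b with | nil => simp at h | cons x t => exact ⟨x, t, rfl⟩
    obtain ⟨a29, b, rfl⟩ : ∃ x t, b = x :: t := by cases b with | nil => simp at h | cons x t => exact ⟨x, t, rfl⟩
    obtain ⟨a30, b, rfl⟩ : ∃ x t, b = x :: t := by cases b with | nil => simp at h | cons x t => exact ⟨x, t, rfl⟩
    obtain ⟨a31, b, rfl⟩ : ∃ x t, b = x :: t := by cases b with | nil => simp at h | cons x t => exact ⟨x, t, rfl⟩
    obtain ⟨a32, b, rfl⟩ : ∃ x t, b = x :: t := by cases b with | nil => simp at h | cons x t => exact ⟨x, t, rfl⟩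
    obtain ⟨a33, b, rfl⟩ : ∃ x t, b = x :: t := by cases b with | nil => simp at h | cons x t => exact ⟨x, t, rfl⟩
    obtain ⟨a34, b, rfl⟩ : ∃ x t, b = x :: t := by cases b with | nil => simp at h | cons x t => exact ⟨x, t, rfl⟩
    obtain ⟨a35, b, rfl⟩ : ∃ x t, b = x :: t := by cases b with | nil => simp at h | cons x t => exact ⟨x, t, rfl⟩
    obtain ⟨a36, b, rfl⟩ : ∃ x t, b = x :: t := by cases b with | nil => simp at h | cons x t => exact ⟨x, t, rfl⟩
    obtain ⟨a37, b, rfl⟩ : ∃ x t, b = x :: t := by cases b with | nil => simp at h | cons x t => exact ⟨x, t, rfl⟩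
    obtain ⟨a38, b, rfl⟩ : ∃ x t, b = x :: t := by cases b with | nil => simp at h | cons x t => exact ⟨x, t, rfl⟩
    obtain ⟨a39, b, rfl⟩ : ∃ x t, b = x :: t := by cases b with | nil => simp at h | cons x t => exact ⟨x, t, rfl⟩
    obtain ⟨a40, b, rfl⟩ : ∃ x t, b = x :: t := by cases b with | nil => simp at h | cons x t => exact ⟨x, t, rfl⟩
    obtain ⟨a41, b, rfl⟩ : ∃ x t, b = x :: t := by cases b with | nil => simp at h | cons x t => exact ⟨x, t, rfl⟩
    obtain ⟨a42, b, rfl⟩ : ∃ x t, b = x :: t := by cases b with | nil => simp at h | cons x t => exact ⟨x, t, rfl⟩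
    obtain ⟨a43, b, rfl⟩ : ∃ x t, b = x :: t := by cases b with | nil => simp at h | cons x t => exact ⟨x, t, rfl⟩
    obtain ⟨a44, b, rfl⟩ : ∃ x t, b = x :: t := by cases b with | nil => simp at h | cons x t => exact ⟨x, t, rfl⟩
    obtain ⟨a45, b, rfl⟩ : ∃ x t, b = x :: t := by cases b with | nil => simp at h | cons x t => exact ⟨x, t, rfl⟩
    obtain ⟨a46, b, rfl⟩ : ∃ x t, b = x :: t := by cases b with | nil => simp at h | cons x t => exact ⟨x, t, rfl⟩
    obtain ⟨a47, b, rfl⟩ : ∃ x t, b = x :: t := by cases b with | nil => simp at h | cons x t => exact ⟨x, t, rfl⟩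
    obtain ⟨a48, b, rfl⟩ : ∃ x t, b = x :: t := by cases b with | nil => simp at h | cons x t => exact ⟨x, t, rfl⟩
    obtain ⟨a49, b, rfl⟩ : ∃ x t, b = x :: t := by cases b with | nil => simp at h | cons x t => exact ⟨x, t, rfl⟩
    obtain ⟨a50, b, rfl⟩ : ∃ x t, b = x :: t := by cases b with | nil => simp at h | cons x t => exact ⟨x, t, rfl⟩
    obtain ⟨a51, b, rfl⟩ : ∃ x t, b = x :: t := by cases b with | nil => simp at h | cons x t => exact ⟨x, t, rfl⟩
    obtain ⟨a52, b, rfl⟩ : ∃ x t, b = x :: t := by cases b with | nil => simp at h | cons x t => exact ⟨x, t, rfl⟩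
    obtain ⟨a53, b, rfl⟩ : ∃ x t, b = x :: t := by cases b with | nil => simp at h | cons x t => exact ⟨x, t, rfl⟩
    obtain ⟨a54, b, rfl⟩ : ∃ x t, b = x :: t := by cases b with | nil => simp at h | cons x t => exact ⟨x, t, rfl⟩
    obtain ⟨a55, b, rfl⟩ : ∃ x t, b = x :: t := by cases b with | nil => simp at h | cons x t => exact ⟨x, t, rfl⟩
    obtain ⟨a56, b, rfl⟩ : ∃ x t, b = x :: t := by cases b with | nil => simp at h | cons x t => exact ⟨x, t, rfl⟩
    obtain ⟨a57, b, rfl⟩ : ∃ x t, b = x :: t := by cases b with | nil => simp at h | cons x t => exact ⟨x, t, rfl⟩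
    obtain ⟨a58, b, rfl⟩ : ∃ x t, b = x :: t := by cases b with | nil => simp at h | cons x t => exact ⟨x, t, rfl⟩
    obtain ⟨a59, b, rfl⟩ : ∃ x t, b = x :: t := by cases b with | nil => simp at h | cons x t => exact ⟨x, t, rfl⟩
    obtain ⟨a60, b, rfl⟩ : ∃ x t, b = x :: t := by cases b with | nil => simp at h | cons x t => exact ⟨x, t, rfl⟩
    obtain ⟨a61, b, rfl⟩ : ∃ x t, b = x :: t := by cases b with | nil => simp at h | cons x t => exact ⟨x, t, rfl⟩
    obtain ⟨a62, b, rfl⟩ : ∃ x t, b = x :: t := by cases b with | nil => simp at h | cons x t => exact ⟨x, t, rfl⟩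
    obtain ⟨a63, b, rfl⟩ : ∃ x t, b = x :: t := by cases b with | nil => simp at h | cons x t => exact ⟨x, t, rfl⟩
    obtain ⟨a64, b, rfl⟩ : ∃ x t, b = x :: t := by cases b with | nil => simp at h | cons x t => exact ⟨x, t, rfl⟩
    obtain ⟨a65, b, rfl⟩ : ∃ x t, b = x :: t := by cases b with | nil => simp at h | cons x t => exact ⟨x, t, rfl⟩
    obtain ⟨a66, b, rfl⟩ : ∃ x t, b = x :: t := by cases b with | nil => simp at h | cons x t => exact ⟨x, t, rfl⟩
    obtain ⟨a67, b, rfl⟩ : ∃ x t, b = x :: t := by cases b with | nil => simp at h | cons x t => exact ⟨x, t, rfl⟩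
    obtain ⟨a68, b, rfl⟩ : ∃ x t, b = x :: t := by cases b with | nil => simp at h | cons x t => exact ⟨x, t, rfl⟩
    obtain ⟨a69, b, rfl⟩ : ∃ x t, b = x :: t := by cases b with | nil => simp at h | cons x t => exact ⟨x, t, rfl⟩
    obtain ⟨a70, b, rfl⟩ : ∃ x t, b = x :: t := by cases b with | nil => simp at h | cons x t => exact ⟨x, t, rfl⟩
    obtain ⟨a71, b, rfl⟩ : ∃ x t, b = x :: t := by cases b with | nil => simp at h | cons x t => exact ⟨x, t, rfl⟩
    obtain ⟨a72, b, rfl⟩ : ∃ x t, b = x :: t := by cases b with | nil => simp at h | cons x t => exact ⟨x, t, rfl⟩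
    obtain ⟨a73, b, rfl⟩ : ∃ x t, b = x :: t := by cases b with | nil => simp at h | cons x t => exact ⟨x, t, rfl⟩
    obtain ⟨a74, b, rfl⟩ : ∃ x t, b = x :: t := by cases b with | nil => simp at h | cons x t => exact ⟨x, t, rfl⟩
    obtain ⟨a75, b, rfl⟩ : ∃ x t, b = x :: t := by cases b with | nil => simp at h | cons x t => exact ⟨x, t, rfl⟩
    obtain ⟨a76, b, rfl⟩ : ∃ x t, b = x :: t := by cases b with | nil => simp at h | cons x t => exact ⟨x, t, rfl⟩
    obtain ⟨a77, b, rfl⟩ : ∃ x t, b = x :: t := by cases b with | nil => simp at h | cons x t => exact ⟨x, t, rfl⟩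
    obtain ⟨a78, b, rfl⟩ : ∃ x t, b = x :: t := by cases b with | nil => simp at h | cons x t => exact ⟨x, t, rfl⟩
    obtain ⟨a79, b, rfl⟩ : ∃ x t, b = x :: t := by cases b with | nil => simp at h | cons x t => exact ⟨x, t, rfl⟩
    have hb : b = [] := by cases b with | nil => rfl | cons x t => simp at h
    subst hb
    simp [TestErreur, TestErreur_alt, pyZipStar, pvFirstBad, pvRowErr, pvColErr,
      PySem.List.pyRange, PySem.List.slice, PySem.List.pyGetD, PySem.List.pyGet?, PySem.List.clampIdx,
      PySem.List.pyIdx?, List.range_succ]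
    by_cases h0 : a0 + (a1 + (a2 + (a3 + (a4 + (a5 + (a6 + (a7))))))) = a64
    ·
      by_cases h1 : a8 + (a9 + (a10 + (a11 + (a12 + (a13 + (a14 + (a15))))))) = a65
      ·
        by_cases h2 : a16 + (a17 + (a18 + (a19 + (a20 + (a21 + (a22 + (a23))))))) = a66
        ·
          by_cases h3 : a24 + (a25 + (a26 + (a27 + (a28 + (a29 + (a30 + (a31))))))) = a67
          ·
            by_cases h4 : a32 + (a33 + (a34 + (a35 + (a36 + (a37 + (a38 + (a39))))))) = a68
            ·
              by_cases h5 : a40 + (a41 + (a42 + (a43 + (a44 + (a45 + (a46 + (a47))))))) = a69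
              ·
                by_cases h6 : a48 + (a49 + (a50 + (a51 + (a52 + (a53 + (a54 + (a55))))))) = a70
                ·
                  by_cases h7 : a56 + (a57 + (a58 + (a59 + (a60 + (a61 + (a62 + (a63))))))) = a71
                  ·
                    by_cases h8 : a0 + (a8 + (a16 + (a24 + (a32 + (a40 + (a48 + (a56))))))) = a72
                    ·
                      by_cases h9 : a1 + (a9 + (a17 + (a25 + (a33 + (a41 + (a49 + (a57))))))) = a73
                      ·
                        by_cases h10 : a2 + (a10 + (a18 + (a26 + (a34 + (a42 + (a50 + (a58))))))) = a74
                        ·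
                          by_cases h11 : a3 + (a11 + (a19 + (a27 + (a35 + (a43 + (a51 + (a59))))))) = a75
                          ·
                            by_cases h12 : a4 + (a12 + (a20 + (a28 + (a36 + (a44 + (a52 + (a60))))))) = a76
                            ·
                              by_cases h13 : a5 + (a13 + (a21 + (a29 + (a37 + (a45 + (a53 + (a61))))))) = a77
                              ·
                                by_cases h14 : a6 + (a14 + (a22 + (a30 + (a38 + (a46 + (a54 + (a62))))))) = a78
                                ·
                                  by_cases h15 : a7 + (a15 + (a23 + (a31 + (a39 + (a47 + (a55 + (a63))))))) = a79
                                  ·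
                                    simp [h0, h1, h2, h3, h4, h5, h6, h7, h8, h9, h10, h11, h12, h13, h14, h15]
                                  · simp [h0, h1, h2, h3, h4, h5, h6, h7, h8, h9, h10, h11, h12, h13, h14, h15]
                                · simp [h0, h1, h2, h3, h4, h5, h6, h7, h8, h9, h10, h11, h12, h13, h14]
                              · simp [h0, h1, h2, h3, h4, h5, h6, h7, h8, h9, h10, h11, h12, h13]
                            · simp [h0, h1, h2, h3, h4, h5, h6, h7, h8, h9, h10, h11, h12]
                          · simp [h0, h1, h2, h3, h4, h5, h6, h7, h8, h9, h10, h11]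
                        · simp [h0, h1, h2, h3, h4, h5, h6, h7, h8, h9, h10]
                      · simp [h0, h1, h2, h3, h4, h5, h6, h7, h8, h9]
                    · simp [h0, h1, h2, h3, h4, h5, h6, h7, h8]
                  · simp [h0, h1, h2, h3, h4, h5, h6, h7]
                · simp [h0, h1, h2, h3, h4, h5, h6]
              · simp [h0, h1, h2, h3, h4, h5]
            · simp [h0, h1, h2, h3, h4]
          · simp [h0, h1, h2, h3]
        · simp [h0, h1, h2]
      · simp [h0, h1]
    · simp [h0]
  · simp [TestErreur, TestErreur_alt, h]
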